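-- pv_equiv track=rewrite | github.com/Jadaan59/Honors-Program-Math | Breaking_Bad.py | try_match_segment
-- ===== SOURCE A (Python) =====
-- def try_match_segment(segment_nums, e_nums):
--     """
--     Given a candidate plaintext segment (list of m_i) and e_i from ciphertext,
--     try to deduce a consistent permutation pi such that e_i = pi(d_i),
--     where d_i = (m_i - m_{i-1}) mod 26 with m_0 = 0.
--
--     Returns:
--         pi (dict: d -> e) if consistent, else None
--     """
--     L = len(segment_nums)
--     assert L == len(e_nums)
--
--     pi = {}      # mapping d -> e
--     prev = 0     # m_0 = 0
--
--     for i in range(L):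
--         m_i = segment_nums[i]
--         d_i = (m_i - prev) % 26
--         prev = m_i
--
--         e_i = e_nums[i]
--
--         if d_i in pi:
--             if pi[d_i] != e_i:
--                 return None  # inconsistency
--         else:
--             pi[d_i] = e_i
--
--     return pi
-- ===== SOURCE B (Python) =====
-- def try_match_segment(segment_nums, e_nums):
--     """
--     Sort-then-scan reformulation: form the (d_i, e_i) pairs, sort their distinct
--     set by d; a conflict exists iff two adjacent distinct pairs share a d.
--     If no conflict, dict(pairs) is the consistent mapping (first-occurrence order).
--     """
--     assert len(segment_nums) == len(e_nums)
--     pairs = [((m - p) % 26, e)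
--              for p, m, e in zip([0] + segment_nums, segment_nums, e_nums)]
--     distinct = sorted(set(pairs), key=lambda q: q[0])
--     if any(a[0] == b[0] for a, b in zip(distinct, distinct[1:])):
--         return None
--     return dict(pairs)
-- ===== Notes on version B (the rewrite author's own statement) =====
-- stated objective: alternative
-- what changed: A deduces the mapping online, maintaining a dict and rejecting on the first clash; B builds all (difference, e) pairs, sorts their distinct set by difference and detects a clash as an adjacent pair sharing a difference, then returns dict(pairs); no mapping is maintained during the scan.
import Mathlib
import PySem

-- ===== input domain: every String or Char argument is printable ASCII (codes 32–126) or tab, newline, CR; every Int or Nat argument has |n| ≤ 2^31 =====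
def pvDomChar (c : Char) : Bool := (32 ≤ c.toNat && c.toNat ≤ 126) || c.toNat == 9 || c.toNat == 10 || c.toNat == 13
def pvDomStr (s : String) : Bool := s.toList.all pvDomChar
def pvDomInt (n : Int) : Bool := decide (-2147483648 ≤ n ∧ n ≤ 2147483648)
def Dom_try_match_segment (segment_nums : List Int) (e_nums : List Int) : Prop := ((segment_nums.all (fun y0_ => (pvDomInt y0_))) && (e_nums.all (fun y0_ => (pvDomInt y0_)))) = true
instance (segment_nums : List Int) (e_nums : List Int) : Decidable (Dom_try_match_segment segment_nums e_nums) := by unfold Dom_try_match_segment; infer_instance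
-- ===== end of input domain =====

-- B replaces A's maintain-a-dict-and-check loop by a sort-then-adjacent-scan over the
-- distinct (difference, e) pairs; same O(n·26) ≈ O(n) task, objective: alternative.

-- ===== PORT A =====
-- A's for-loop over i with state (prev, pi) and early return, as recursion over the (m_i, e_i) pairs.
def tryA_go : List (Int × Int) → Int → PySem.Dict Int Int → Option (PySem.Dict Int Int)
  | [], _, pi => some pi
  | (m, e) :: rest, prev, pi =>
      let d := PySem.Int.mod (m - prev) 26
      match pi.get? d with
      | some v => if v ≠ e then none else tryA_go rest m pi
      | none   => tryA_go rest m (pi.insert d e)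

def try_match_segment (segment_nums : List Int) (e_nums : List Int) : Option (List (Int × Int)) :=
  (tryA_go (segment_nums.zip e_nums) 0 PySem.Dict.empty).map PySem.Dict.items

-- ===== PORT B =====
-- pairs = [((m - p) % 26, e) for p, m, e in zip([0] + segment_nums, segment_nums, e_nums)]
def b_pairs (segment_nums : List Int) (e_nums : List Int) : List (Int × Int) :=
  (((0 :: segment_nums).zip segment_nums).zip e_nums).map
    (fun t => (PySem.Int.mod (t.1.2 - t.1.1) 26, t.2))

-- any(a[0] == b[0] for a, b in zip(distinct, distinct[1:]))  (distinct[1:] = drop 1, exact)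
def b_adj (distinct : List (Int × Int)) : Bool :=
  (distinct.zip (distinct.drop 1)).any (fun ab => ab.1.1 == ab.2.1)

def try_match_segment_alt (segment_nums : List Int) (e_nums : List Int) : Option (List (Int × Int)) :=
  let pairs := b_pairs segment_nums e_nums
  let distinct := PySem.List.sorted (PySem.Set.ofList pairs) (fun q => q.1)
  if b_adj distinct then none
  else some ((pairs.foldl (fun d p => d.insert p.1 p.2) PySem.Dict.empty).items)

-- ===== PRECONDITION & SPEC =====
-- Pre_ excludes exactly the inputs on which A's `assert L == len(e_nums)` raises AssertionError.
def Pre_try_match_segment (segment_nums : List Int) (e_nums : List Int) : Prop :=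
  segment_nums.length = e_nums.length
instance (segment_nums : List Int) (e_nums : List Int) : Decidable (Pre_try_match_segment segment_nums e_nums) := by unfold Pre_try_match_segment; infer_instance

def pvWitness_try_match_segment : List Int × List Int := ([1, 2, 3], [4, 5, 4])

def Spec_try_match_segment (segment_nums : List Int) (e_nums : List Int) (out : Option (List (Int × Int))) : Prop := out = try_match_segment_alt segment_nums e_nums
instance (segment_nums : List Int) (e_nums : List Int) (out : Option (List (Int × Int))) : Decidable (Spec_try_match_segment segment_nums e_nums out) := by unfold Spec_try_match_segment; infer_instance

-- ===== CLAIM (what is proved, stated in full; the proofs are below) =====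
def Claim_equal_try_match_segment : Prop := ∀ (segment_nums : List Int) (e_nums : List Int), Dom_try_match_segment segment_nums e_nums → Pre_try_match_segment segment_nums e_nums → Spec_try_match_segment segment_nums e_nums (try_match_segment segment_nums e_nums)

-- ===== LEMMAS AND PROOFS =====

-- structural form of the difference list
def pvDiffs : List Int → Int → List Int
  | [], _ => []
  | m :: r, prev => PySem.Int.mod (m - prev) 26 :: pvDiffs r m

-- A's loop rephrased over (d_i, e_i) pairs (proof-side only)
def pvGoA : List (Int × Int) → PySem.Dict Int Int → Option (PySem.Dict Int Int)
  | [], pi => some pi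
  | (d, e) :: rest, pi =>
      match pi.get? d with
      | some v => if v ≠ e then none else pvGoA rest pi
      | none   => pvGoA rest (pi.insert d e)

-- a conflict: two recorded pairs with the same difference but different e
def pvConf (pairs : List (Int × Int)) : Prop :=
  ∃ p ∈ pairs, ∃ q ∈ pairs, q.1 = p.1 ∧ q.2 ≠ p.2

-- conflict relative to an already-built dict (invariant of A's loop)
def pvConf2 (pi : PySem.Dict Int Int) (pairs : List (Int × Int)) : Prop :=
  ∃ p ∈ pairs, (∃ v, pi.get? p.1 = some v ∧ v ≠ p.2) ∨
    (pi.get? p.1 = none ∧ ∃ q ∈ pairs, q.1 = p.1 ∧ q.2 ≠ p.2)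

lemma pv_bridge (ms : List Int) : ∀ (es : List Int) (prev : Int) (pi : PySem.Dict Int Int),
    tryA_go (ms.zip es) prev pi = pvGoA ((pvDiffs ms prev).zip es) pi := by
  induction ms with
  | nil => intro es prev pi; rfl
  | cons m rest ih =>
      intro es prev pi
      cases es with
      | nil => rfl
      | cons e et =>
          simp only [List.zip_cons_cons, pvDiffs, tryA_go, pvGoA]
          cases pi.get? (PySem.Int.mod (m - prev) 26) with
          | none => exact ih et m _
          | some v =>
              by_cases hv : v = e
              · simp [hv, ih et m pi]
              · simp [hv]

lemma pv_pairs_eq (seg : List Int) : ∀ (es : List Int) (prev : Int),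
    (((prev :: seg).zip seg).zip es).map
      (fun t => (PySem.Int.mod (t.1.2 - t.1.1) 26, t.2)) = (pvDiffs seg prev).zip es := by
  induction seg with
  | nil => intro es prev; cases es <;> rfl
  | cons m rest ih =>
      intro es prev
      cases es with
      | nil => rfl
      | cons e et =>
          simp only [List.zip_cons_cons, List.map_cons, pvDiffs]
          exact congrArg _ (ih et m)

-- ---- dict helper lemmas ----

lemma pv_mem_of_get?_eq_some {ν : Type} (d : PySem.Dict Int ν) (k : Int) (v : ν)
    (h : d.get? k = some v) : (k, v) ∈ d.items := by
  simp only [PySem.Dict.get?, Option.map_eq_some_iff] at h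
  obtain ⟨q, hq, hq2⟩ := h
  have h1 : q.1 = k := by simpa using List.find?_some hq
  have := List.mem_of_find?_eq_some hq
  cases q; simp_all

lemma pv_get?_eq_none_contains {ν : Type} (g : PySem.Dict Int ν) (k : Int)
    (h : g.get? k = none) : g.contains k = false := by
  simp only [PySem.Dict.get?, Option.map_eq_none_iff, List.find?_eq_none, beq_iff_eq] at h
  simp only [PySem.Dict.contains, List.any_eq_false, beq_iff_eq]
  exact h

-- with nodup keys, re-inserting the entry that is already there changes nothing
lemma pv_replace_self {ν : Type} (l : List (Int × ν)) (k : Int) (v : ν)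
    (hnd : (l.map Prod.fst).Nodup) (hm : (k, v) ∈ l) :
    l.map (fun p => if p.1 == k then (k, v) else p) = l := by
  have ht : ∀ p ∈ l, (if (p.1 == k) = true then (k, v) else p) = p := by
    intro p hp
    by_cases hpk : p.1 = k
    · have : p = (k, v) := by
        have h1 : p.1 = (k, v).1 := hpk
        exact List.inj_on_of_nodup_map hnd hp hm h1
      simp [this]
    · simp [hpk]
  rw [List.map_congr_left ht, List.map_id']

lemma pv_insert_self {ν : Type} (d : PySem.Dict Int ν) (k : Int) (v : ν)
    (hnd : (d.items.map Prod.fst).Nodup) (h : d.get? k = some v) :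
    d.insert k v = d := by
  have hm := pv_mem_of_get?_eq_some d k v h
  have hc : d.contains k = true := by
    simp only [PySem.Dict.contains, List.any_eq_true]
    exact ⟨(k, v), hm, by simp⟩
  cases d with
  | mk items =>
      simp only [PySem.Dict.insert, hc, if_pos trivial]
      exact congrArg PySem.Dict.mk (pv_replace_self items k v hnd hm)

lemma pv_insert_new_items {ν : Type} (d : PySem.Dict Int ν) (k : Int) (v : ν)
    (h : d.get? k = none) : (d.insert k v).items = d.items ++ [(k, v)] := by
  simp [PySem.Dict.insert, pv_get?_eq_none_contains d k h]

lemma pv_insert_new_nodup {ν : Type} (d : PySem.Dict Int ν) (k : Int) (v : ν)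
    (hnd : (d.items.map Prod.fst).Nodup) (h : d.get? k = none) :
    ((d.insert k v).items.map Prod.fst).Nodup := by
  rw [pv_insert_new_items d k v h]
  simp only [List.map_append]
  apply List.Nodup.append hnd (by simp)
  simp only [PySem.Dict.get?, Option.map_eq_none_iff, List.find?_eq_none, beq_iff_eq] at h
  intro a ha hb
  rcases List.mem_map.mp ha with ⟨r, hr, hra⟩
  simp only [List.map_cons, List.map_nil, List.mem_singleton] at hb
  exact h r hr (by rw [hra, hb])

lemma pv_get?_insert_new {ν : Type} (d : PySem.Dict Int ν) (k : Int) (v : ν) (k' : Int)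
    (h : d.get? k = none) :
    (d.insert k v).get? k' = if d.get? k' = none then (if k' = k then some v else none)
      else d.get? k' := by
  have hit := pv_insert_new_items d k v h
  simp only [PySem.Dict.get?, hit, List.find?_append]
  cases hf : d.items.find? (fun p => p.1 == k') with
  | some q => simp
  | none =>
      by_cases hk : k' = k
      · subst hk; simp
      · have hk' : ¬ k = k' := fun hh => hk hh.symm
        simp [hk, hk']

-- ---- A's loop termination value ----

lemma pvA_some (pairs : List (Int × Int)) : ∀ (pi : PySem.Dict Int Int),
    (pi.items.map Prod.fst).Nodup → ¬ pvConf2 pi pairs →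
    pvGoA pairs pi = some (pairs.foldl (fun d p => d.insert p.1 p.2) pi) := by
  induction pairs with
  | nil => intro pi _ _; rfl
  | cons p rest ih =>
      obtain ⟨d, e⟩ := p
      intro pi hnd hnc
      simp only [pvGoA, List.foldl_cons]
      cases h : pi.get? d with
      | some v =>
          have hv : v = e := by
            by_contra hv
            exact hnc ⟨(d, e), List.mem_cons_self, Or.inl ⟨v, h, hv⟩⟩
          subst hv
          show (if v ≠ v then none else pvGoA rest pi) = _
          rw [if_neg (by simp), pv_insert_self pi d v hnd h]
          refine ih pi hnd ?_
          intro ⟨q, hq, hc⟩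
          refine hnc ⟨q, List.mem_cons_of_mem _ hq, ?_⟩
          rcases hc with hl | ⟨hn, r, hr, hrc⟩
          · exact Or.inl hl
          · exact Or.inr ⟨hn, r, List.mem_cons_of_mem _ hr, hrc⟩
      | none =>
          show pvGoA rest (pi.insert d e) = _
          have hnd' := pv_insert_new_nodup pi d e hnd h
          refine ih (pi.insert d e) hnd' ?_
          intro ⟨q, hq, hc⟩
          rcases hc with ⟨v, hv, hvne⟩ | ⟨hn, r, hr, hrc⟩
          · rw [pv_get?_insert_new pi d e q.1 h] at hv
            by_cases hq0 : pi.get? q.1 = none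
            · rw [if_pos hq0] at hv
              by_cases hqd : q.1 = d
              · rw [if_pos hqd] at hv
                have hve : e = v := by injection hv
                refine hnc ⟨q, List.mem_cons_of_mem _ hq,
                  Or.inr ⟨hq0, (d, e), List.mem_cons_self, hqd.symm, ?_⟩⟩
                show e ≠ q.2
                rw [hve]; exact hvne
              · rw [if_neg hqd] at hv; cases hv
            · rw [if_neg hq0] at hv
              exact hnc ⟨q, List.mem_cons_of_mem _ hq, Or.inl ⟨v, hv, hvne⟩⟩
          · rw [pv_get?_insert_new pi d e q.1 h] at hn
            by_cases hq0 : pi.get? q.1 = none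
            · rw [if_pos hq0] at hn
              by_cases hqd : q.1 = d
              · rw [if_pos hqd] at hn; cases hn
              · exact hnc ⟨q, List.mem_cons_of_mem _ hq,
                  Or.inr ⟨hq0, r, List.mem_cons_of_mem _ hr, hrc⟩⟩
            · rw [if_neg hq0] at hn; exact hq0 hn

lemma pvA_none (pairs : List (Int × Int)) : ∀ (pi : PySem.Dict Int Int),
    (pi.items.map Prod.fst).Nodup → pvConf2 pi pairs →
    pvGoA pairs pi = none := by
  induction pairs with
  | nil => intro pi _ hc; exact absurd hc (by simp [pvConf2])
  | cons p rest ih =>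
      obtain ⟨d, e⟩ := p
      intro pi hnd hc
      simp only [pvGoA]
      cases h : pi.get? d with
      | some v =>
          by_cases hv : v = e
          · subst hv
            show (if v ≠ v then none else pvGoA rest pi) = none
            rw [if_neg (by simp)]
            refine ih pi hnd ?_
            obtain ⟨q, hq, hqc⟩ := hc
            rcases List.mem_cons.mp hq with rfl | hq'
            · rcases hqc with ⟨w, hw, hwne⟩ | ⟨hn, _⟩
              · have hw' : v = w := by rw [h] at hw; injection hw
                exact absurd hw'.symm hwne
              · rw [h] at hn; cases hn
            · refine ⟨q, hq', ?_⟩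
              rcases hqc with hl | ⟨hn, r, hr, hrc⟩
              · exact Or.inl hl
              · rcases List.mem_cons.mp hr with rfl | hr'
                · have : pi.get? q.1 = some v := by rw [← hrc.1]; exact h
                  rw [this] at hn; cases hn
                · exact Or.inr ⟨hn, r, hr', hrc⟩
          · show (if v ≠ e then none else pvGoA rest pi) = none
            rw [if_pos hv]
      | none =>
          show pvGoA rest (pi.insert d e) = none
          have hnd' := pv_insert_new_nodup pi d e hnd h
          refine ih (pi.insert d e) hnd' ?_
          obtain ⟨q, hq, hqc⟩ := hc
          rcases List.mem_cons.mp hq with rfl | hq'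
          · -- q = (d, e) itself: only the none-branch is possible
            rcases hqc with ⟨w, hw, _⟩ | ⟨_, r, hr, hrc⟩
            · rw [h] at hw; cases hw
            · rcases List.mem_cons.mp hr with rfl | hr'
              · exact absurd rfl hrc.2
              · refine ⟨r, hr', Or.inl ⟨e, ?_, Ne.symm hrc.2⟩⟩
                rw [pv_get?_insert_new pi d e r.1 h, hrc.1]
                simp [h]
          · rcases hqc with ⟨v, hv, hvne⟩ | ⟨hn, r, hr, hrc⟩
            · refine ⟨q, hq', Or.inl ⟨v, ?_, hvne⟩⟩
              rw [pv_get?_insert_new pi d e q.1 h]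
              simp [hv]
            · by_cases hqd : q.1 = d
              · by_cases hpe : e = q.2
                · -- the conflicting partner r must differ from (d,e); it conflicts with e
                  have hrd : r ≠ (d, e) := by
                    intro hre; rw [hre] at hrc; exact hrc.2 (by simp [hpe])
                  rcases List.mem_cons.mp hr with rfl | hr'
                  · exact absurd rfl hrd
                  · refine ⟨r, hr', Or.inl ⟨e, ?_, ?_⟩⟩
                    · rw [pv_get?_insert_new pi d e r.1 h, hrc.1, hqd]
                      simp [h]
                    · rw [hpe]; exact Ne.symm hrc.2
                · refine ⟨q, hq', Or.inl ⟨e, ?_, hpe⟩⟩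
                  rw [pv_get?_insert_new pi d e q.1 h, hqd]
                  simp [h]
              · have hr' : r ∈ rest := by
                  rcases List.mem_cons.mp hr with rfl | hr'
                  · exact absurd hrc.1.symm hqd
                  · exact hr'
                refine ⟨q, hq', Or.inr ⟨?_, r, hr', hrc⟩⟩
                rw [pv_get?_insert_new pi d e q.1 h]
                simp [hn, hqd]

lemma pv_conf2_empty (pairs : List (Int × Int)) :
    pvConf2 PySem.Dict.empty pairs ↔ pvConf pairs := by
  simp [pvConf2, pvConf, PySem.Dict.empty, PySem.Dict.get?]

-- ---- B's sort-then-scan check ----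

-- adjacent elements of a Nodup list are distinct
lemma pv_zip_tail_ne {α : Type} (t : List α) (hnd : t.Nodup) :
    ∀ ab ∈ t.zip (t.drop 1), ab.1 ≠ ab.2 := by
  induction t with
  | nil => intro ab h; cases h
  | cons a t' ih =>
      intro ab hab
      cases t' with
      | nil => cases hab
      | cons b t'' =>
          simp only [List.drop_one, List.tail_cons, List.zip_cons_cons] at hab
          rcases List.mem_cons.mp hab with rfl | h
          · intro he
            refine (List.nodup_cons.mp hnd).1 ?_
            rw [show a = b from he]
            exact List.mem_cons_self
          · exact ih (List.nodup_cons.mp hnd).2 ab (by simpa using h)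

-- a sorted-by-fst list with the head sharing a fst with a later element has
-- an equal-fst adjacent pair at the front
lemma pv_adj_head (a : Int × Int) (t' : List (Int × Int))
    (h1 : ∀ x ∈ t', a.1 ≤ x.1) (hpw : t'.Pairwise (fun x y => x.1 ≤ y.1))
    (q : Int × Int) (hq : q ∈ t') (hf : a.1 = q.1) :
    ∃ ab ∈ (a :: t').zip t', ab.1.1 = ab.2.1 := by
  cases t' with
  | nil => cases hq
  | cons b t'' =>
      refine ⟨(a, b), by simp, ?_⟩
      rcases List.mem_cons.mp hq with rfl | hq'
      · exact hf
      · have h2 : b.1 ≤ q.1 := (List.pairwise_cons.mp hpw).1 q hq'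
        have h3 : a.1 ≤ b.1 := h1 b List.mem_cons_self
        show a.1 = b.1
        omega

lemma pv_adj_exists (t : List (Int × Int))
    (hpw : t.Pairwise (fun x y => x.1 ≤ y.1))
    (p q : Int × Int) (hp : p ∈ t) (hq : q ∈ t) (hne : p ≠ q) (hf : p.1 = q.1) :
    ∃ ab ∈ t.zip (t.drop 1), ab.1.1 = ab.2.1 := by
  induction t with
  | nil => cases hp
  | cons a t' ih =>
      obtain ⟨h1, hpw'⟩ := List.pairwise_cons.mp hpw
      have lift : (∃ ab ∈ t'.zip (t'.drop 1), ab.1.1 = ab.2.1) →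
          ∃ ab ∈ (a :: t').zip ((a :: t').drop 1), ab.1.1 = ab.2.1 := by
        rintro ⟨ab, hab, habf⟩
        cases t' with
        | nil => cases hab
        | cons b t'' =>
            exact ⟨ab, by simp only [List.drop_one, List.tail_cons,
              List.zip_cons_cons] at hab ⊢; exact List.mem_cons_of_mem _ hab, habf⟩
      rcases List.mem_cons.mp hp with rfl | hp'
      · rcases List.mem_cons.mp hq with rfl | hq'
        · exact absurd rfl hne
        · simpa using pv_adj_head p t' h1 hpw' q hq' hf
      · rcases List.mem_cons.mp hq with rfl | hq'
        · simpa using pv_adj_head q t' h1 hpw' p hp' hf.symm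
        · exact lift (ih hpw' hp' hq')

lemma pv_badj_iff (pairs : List (Int × Int)) :
    b_adj (PySem.List.sorted (PySem.Set.ofList pairs) (fun q => q.1)) = true ↔
      pvConf pairs := by
  have hperm : (PySem.List.sorted (PySem.Set.ofList pairs) (fun q => q.1)).Perm
      (PySem.Set.ofList pairs) := PySem.List.sorted_perm _ _ _
  have hnd : (PySem.List.sorted (PySem.Set.ofList pairs) (fun q => q.1)).Nodup :=
    hperm.symm.nodup (PySem.Set.nodup_ofList pairs)
  have hmem : ∀ x, x ∈ PySem.List.sorted (PySem.Set.ofList pairs) (fun q => q.1) ↔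
      x ∈ pairs := by
    intro x
    rw [hperm.mem_iff, PySem.Set.mem_ofList]
  have hpw : (PySem.List.sorted (PySem.Set.ofList pairs) (fun q => q.1)).Pairwise
      (fun x y => x.1 ≤ y.1) := PySem.List.sorted_pairwise _ _
  constructor
  · intro h
    obtain ⟨ab, hab, habf⟩ := List.any_eq_true.mp h
    have hne := pv_zip_tail_ne _ hnd ab hab
    obtain ⟨h1, h2⟩ := List.of_mem_zip hab
    have hf : ab.1.1 = ab.2.1 := beq_iff_eq.mp habf
    refine ⟨ab.2, (hmem _).mp (List.mem_of_mem_drop h2), ab.1, (hmem _).mp h1, hf, ?_⟩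
    intro hsnd
    exact hne (Prod.ext hf hsnd)
  · rintro ⟨p, hp, q, hq, hf, hs⟩
    have hne : p ≠ q := fun h => hs (by rw [h])
    obtain ⟨ab, hab, habf⟩ :=
      pv_adj_exists _ hpw p q ((hmem p).mpr hp) ((hmem q).mpr hq) hne hf.symm
    exact List.any_eq_true.mpr ⟨ab, hab, beq_iff_eq.mpr habf⟩

-- ===== VERDICT (by name: the statement is the Claim_ definition above) =====
theorem try_match_segment_spec : Claim_equal_try_match_segment := by
  intro seg es _ _
  unfold Spec_try_match_segment try_match_segment try_match_segment_alt
  rw [pv_bridge, ← pv_pairs_eq seg es 0]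
  show (pvGoA (b_pairs seg es) PySem.Dict.empty).map PySem.Dict.items = _
  by_cases hc : pvConf (b_pairs seg es)
  · rw [pvA_none _ _ (by simp [PySem.Dict.empty]) ((pv_conf2_empty _).mpr hc)]
    rw [if_pos ((pv_badj_iff _).mpr hc)]
    rfl
  · rw [pvA_some _ _ (by simp [PySem.Dict.empty]) (fun h => hc ((pv_conf2_empty _).mp h))]
    rw [if_neg (fun h => hc ((pv_badj_iff _).mp h))]
    rfl
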